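-- pv_equiv track=rewrite | github.com/szufix/mapel | mapel/elections/cultures/guardians_plus.py | distribute_in_matrix
-- ===== SOURCE A (Python) =====
-- def distribute_in_matrix(n,m):
--     if m == 0:
--         return []
--     k = n // m
--     r = n - k * m
--     matrix = []
--     for i in range(m):
--         row = [k for _ in range(m)]
--         for j in range(i,i+r):
--             if j >= m:
--                 j = j - m
--             row[j] = row[j] + 1
--         matrix.append(row)
--     return matrix
-- ===== SOURCE B (Python) =====
-- def distribute_in_matrix(n, m):
--     if m == 0:
--         return []
--     k, r = divmod(n, m)
--     base = [k + 1] * r + [k] * (m - r)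
--     return [base[m - i:] + base[:m - i] for i in range(m)]
-- ===== Notes on version B (the rewrite author's own statement) =====
-- stated objective: alternative
-- what changed: Instead of building each row as m copies of k and then incrementing r wrapped cells in place with a manual wraparound branch, B builds one base row ([k+1]*r + [k]*(m-r)) and emits each row i as a rotation of it by slicing (base[m-i:] + base[:m-i]), so there is no per-cell mutation or wrap arithmetic.
import Mathlib
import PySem

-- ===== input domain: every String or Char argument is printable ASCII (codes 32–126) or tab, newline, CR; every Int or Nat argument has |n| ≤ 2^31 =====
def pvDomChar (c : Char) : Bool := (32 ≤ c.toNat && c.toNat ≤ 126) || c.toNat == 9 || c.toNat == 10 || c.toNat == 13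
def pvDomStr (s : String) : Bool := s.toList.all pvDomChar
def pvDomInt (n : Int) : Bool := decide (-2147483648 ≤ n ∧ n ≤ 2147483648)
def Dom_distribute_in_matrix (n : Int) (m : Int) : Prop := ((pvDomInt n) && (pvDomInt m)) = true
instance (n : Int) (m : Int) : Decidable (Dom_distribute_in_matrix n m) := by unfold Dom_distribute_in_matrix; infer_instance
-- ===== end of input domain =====

-- B replaces A's in-place increment loop over r wrapped positions by one base row
-- [k+1]*r + [k]*(m-r) rotated by slicing for each row: no per-cell mutation or wrap branch.

-- ===== PORT A =====
-- the body of A's outer loop: build a row of k's, then increment r wrapped cells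
def pvRowA (m k r i : Int) : List Int :=
  let row := (PySem.List.pyRange 0 m 1).map (fun _ => k)
  (PySem.List.pyRange i (i + r) 1).foldl (fun row j =>
    let j' := if j ≥ m then j - m else j
    PySem.List.pySetD row j' (PySem.List.pyGetD row j' 0 + 1)) row

def distribute_in_matrix (n : Int) (m : Int) : List (List Int) :=
  if m == 0 then [] else
    let k := PySem.Int.floordiv n m
    let r := n - k * m
    (PySem.List.pyRange 0 m 1).foldl (fun matrix i => matrix ++ [pvRowA m k r i]) []

-- ===== PORT B =====
def distribute_in_matrix_alt (n : Int) (m : Int) : List (List Int) :=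
  if m == 0 then [] else
    let k := PySem.Int.floordiv n m
    let r := PySem.Int.mod n m
    let base := PySem.List.pyRepeat [k + 1] r ++ PySem.List.pyRepeat [k] (m - r)
    (PySem.List.pyRange 0 m 1).map (fun i =>
      PySem.List.slice base (some (m - i)) none ++ PySem.List.slice base none (some (m - i)))

-- ===== PRECONDITION & SPEC =====
def Spec_distribute_in_matrix (n : Int) (m : Int) (out : List (List Int)) : Prop := out = distribute_in_matrix_alt n m
instance (n : Int) (m : Int) (out : List (List Int)) : Decidable (Spec_distribute_in_matrix n m out) := by unfold Spec_distribute_in_matrix; infer_instance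

-- ===== CLAIM (what is proved, stated in full; the proofs are below) =====
def Claim_equal_distribute_in_matrix : Prop := ∀ (n : Int) (m : Int), Dom_distribute_in_matrix n m → Spec_distribute_in_matrix n m (distribute_in_matrix n m)

-- ===== LEMMAS AND PROOFS =====

-- foldl that appends one element per iteration is a map
theorem pv_foldl_append_map {α β : Type} (l : List α) (f : α → β) (init : List β) :
    l.foldl (fun acc a => acc ++ [f a]) init = init ++ l.map f := by
  induction l generalizing init with
  | nil => simp
  | cons a t ih => simp [List.foldl_cons, ih, List.append_assoc]

-- emod of a value in [-m, m)
theorem pv_emod_small (x m : Int) (_hm : 0 < m) (h1 : -m ≤ x) (h2 : x < m) :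
    x % m = if 0 ≤ x then x else x + m := by
  have hmm : (x + m) % m = x % m := by
    have h := Int.add_mul_emod_self_left (a := x) (b := m) (c := 1)
    rw [mul_one] at h
    exact h
  split_ifs with h
  · exact Int.emod_eq_of_lt h h2
  · rw [← hmm]; exact Int.emod_eq_of_lt (by omega) (by omega)

-- inner loop characterisation: after the first t increments, cell j holds
-- k + 1 exactly when (j - i) % m < t
theorem pv_inner (m k i : Int) (hm : 0 < m) (hi0 : 0 ≤ i) (him : i < m) (t : Nat)
    (ht : (t : Int) ≤ m) :
    (PySem.List.pyRange i (i + (t : Int)) 1).foldl (fun row j =>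
        let j' := if j ≥ m then j - m else j
        PySem.List.pySetD row j' (PySem.List.pyGetD row j' 0 + 1))
      ((PySem.List.pyRange 0 m 1).map (fun _ => k))
    = (PySem.List.pyRange 0 m 1).map (fun j =>
        k + if (j - i) % m < (t : Int) then 1 else 0) := by
  induction t with
  | zero =>
    rw [show i + ((0 : Nat) : Int) = i by omega, PySem.List.pyRange_one_eq_nil le_rfl]
    simp only [List.foldl_nil]
    refine List.map_congr_left (fun j hj => ?_)
    have hcond : ¬ (j - i) % m < ((0 : Nat) : Int) := by
      have := Int.emod_nonneg (j - i) (by omega : m ≠ 0)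
      omega
    rw [if_neg hcond]; ring
  | succ t ih =>
    have ht' : (t : Int) ≤ m := by push_cast at ht ⊢; omega
    have hsplit : PySem.List.pyRange i (i + ((t + 1 : Nat) : Int)) 1
        = PySem.List.pyRange i (i + (t : Int)) 1 ++ [i + (t : Int)] := by
      rw [show i + ((t + 1 : Nat) : Int) = (i + (t : Int)) + 1 by push_cast; ring]
      exact PySem.List.pyRange_one_succ_right (by omega)
    rw [hsplit, List.foldl_append, ih ht', List.foldl_cons, List.foldl_nil]
    -- the position touched at step t
    set j' : Int := if i + (t : Int) ≥ m then i + (t : Int) - m else i + (t : Int) with hj'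
    have hj'0 : 0 ≤ j' := by rw [hj']; split_ifs <;> omega
    have hj'm : j' < m := by rw [hj']; split_ifs <;> push_cast at ht <;> omega
    have hj'mod : (j' - i) % m = (t : Int) := by
      rw [pv_emod_small _ _ hm (by rw [hj']; split_ifs <;> omega)
            (by rw [hj']; split_ifs <;> omega)]
      rw [hj']; split_ifs <;> omega
    have hget : PySem.List.pyGetD ((PySem.List.pyRange 0 m 1).map (fun j =>
        k + if (j - i) % m < (t : Int) then 1 else 0)) j' 0
        = k + if (j' - i) % m < (t : Int) then 1 else 0 :=
      PySem.List.pyGetD_map_pyRange_of_nonneg _ _ _ _ hj'0 hj'm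
    simp only []
    rw [PySem.List.pySetD_of_nonneg _ _ hj'0, hget, hj'mod,
        if_neg (lt_irrefl ((t : Nat) : Int))]
    refine List.ext_getElem (by simp) (fun p hp1 hp2 => ?_)
    have hpm : p < m.toNat := by
      rw [List.length_map, PySem.List.length_pyRange_one] at hp2
      omega
    have hpg : ∀ h, (PySem.List.pyRange 0 m 1)[p]'h = (p : Int) := by
      intro h; rw [PySem.List.getElem_pyRange_one]; omega
    rw [List.getElem_set]
    split_ifs with hpj
    · -- p is the touched cell: t < t + 1
      rw [List.getElem_map, hpg]
      have hp' : (p : Int) = j' := by omega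
      rw [hp', hj'mod, if_pos (by push_cast; omega)]
      ring
    · -- untouched cell: its residue is not t, so the threshold move changes nothing
      rw [List.getElem_map, List.getElem_map, hpg]
      have hpmod : ((p : Int) - i) % m
          = if 0 ≤ (p : Int) - i then (p : Int) - i else (p : Int) - i + m :=
        pv_emod_small ((p : Int) - i) m hm (by omega) (by omega)
      have hne : ((p : Int) - i) % m ≠ (t : Int) := by
        intro hEq
        apply hpj
        have : (p : Int) = j' := by
          rw [hpmod] at hEq
          rw [hj'] at *
          split_ifs at hEq <;> split_ifs <;> omega
        omega
      by_cases hc : ((p : Int) - i) % m < (t : Int)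
      · rw [if_pos hc, if_pos (by push_cast; omega)]
      · rw [if_neg hc, if_neg (by push_cast at hc ⊢; omega)]

-- pv_inner restated for the row helper
theorem pv_rowA_eq (m k i : Int) (hm : 0 < m) (hi0 : 0 ≤ i) (him : i < m) (t : Nat)
    (ht : (t : Int) ≤ m) :
    pvRowA m k (t : Int) i
    = (PySem.List.pyRange 0 m 1).map (fun j =>
        k + if (j - i) % m < (t : Int) then 1 else 0) := by
  unfold pvRowA
  exact pv_inner m k i hm hi0 him t ht

-- B's rotated base row equals the per-cell formula row
theorem pv_rot (m k i r : Int) (hm : 0 < m) (hi0 : 0 ≤ i) (him : i < m)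
    (hr0 : 0 ≤ r) (hrm : r < m) :
    PySem.List.slice (PySem.List.pyRepeat [k + 1] r ++ PySem.List.pyRepeat [k] (m - r)) (some (m - i)) none
      ++ PySem.List.slice (PySem.List.pyRepeat [k + 1] r ++ PySem.List.pyRepeat [k] (m - r)) none (some (m - i))
    = (PySem.List.pyRange 0 m 1).map (fun j =>
        k + if (j - i) % m < r then 1 else 0) := by
  rw [PySem.List.pyRepeat_singleton, PySem.List.pyRepeat_singleton,
      PySem.List.slice_from _ (by omega : (0:Int) ≤ m - i),
      PySem.List.slice_to _ (by omega : (0:Int) ≤ m - i)]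
  set base := List.replicate r.toNat (k + 1) ++ List.replicate (m - r).toNat k with hbase
  have hbl : base.length = m.toNat := by
    rw [hbase, List.length_append, List.length_replicate, List.length_replicate]; omega
  have hbget : ∀ q (h : q < m.toNat),
      base[q]'(by rw [hbl]; exact h) = k + if (q : Int) < r then 1 else 0 := by
    intro q h
    simp only [hbase]
    by_cases hq : q < r.toNat
    · rw [List.getElem_append_left (by rw [List.length_replicate]; exact hq),
          List.getElem_replicate, if_pos (by omega)]
    · rw [List.getElem_append_right (by rw [List.length_replicate]; omega),
          List.getElem_replicate, if_neg (by omega)]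
      ring
  refine List.ext_getElem ?_ (fun p hp1 hp2 => ?_)
  · rw [List.length_append, List.length_drop, List.length_take, hbl,
        List.length_map, PySem.List.length_pyRange_one]
    omega
  · have hpm : p < m.toNat := by
      rw [List.length_map, PySem.List.length_pyRange_one] at hp2; omega
    have hpg : ∀ h, (PySem.List.pyRange 0 m 1)[p]'h = (p : Int) := by
      intro h; rw [PySem.List.getElem_pyRange_one]; omega
    rw [List.getElem_map, hpg]
    have hpmod : ((p : Int) - i) % m
        = if 0 ≤ (p : Int) - i then (p : Int) - i else (p : Int) - i + m :=
      pv_emod_small ((p : Int) - i) m hm (by omega) (by omega)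
    by_cases hsplit : p < (base.drop (m - i).toNat).length
    · rw [List.getElem_append_left hsplit, List.getElem_drop, hbget _ (by
        rw [List.length_drop, hbl] at hsplit; omega)]
      rw [List.length_drop, hbl] at hsplit
      rw [hpmod]
      split_ifs <;> omega
    · rw [List.getElem_append_right (by omega), List.getElem_take,
          hbget _ (by rw [List.length_drop, hbl] at hsplit; omega)]
      rw [List.length_drop, hbl] at hsplit
      simp only [List.length_drop, hbl]
      rw [hpmod]
      split_ifs <;> omega

-- ===== VERDICT (by name: the statement is the Claim_ definition above) =====
theorem distribute_in_matrix_spec : Claim_equal_distribute_in_matrix := by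
  intro n m _
  unfold Spec_distribute_in_matrix distribute_in_matrix distribute_in_matrix_alt
  by_cases hm : m = 0
  · simp [hm]
  · rw [if_neg (by simpa using hm), if_neg (by simpa using hm)]
    simp only []
    by_cases hmp : 0 < m
    case neg =>
      rw [PySem.List.pyRange_one_eq_nil (by omega : m ≤ (0 : Int))]
      simp
    case pos =>
      have hfm := PySem.Int.floordiv_mul_add_mod n m
      have hr : n - PySem.Int.floordiv n m * m = PySem.Int.mod n m := by linarith
      have hmod : PySem.Int.mod n m = n % m := PySem.Int.mod_eq_emod_of_pos hmp
      have hr0 : 0 ≤ n % m := Int.emod_nonneg n (by omega)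
      have hrm : n % m < m := Int.emod_lt_of_pos n hmp
      rw [pv_foldl_append_map, List.nil_append]
      refine List.map_congr_left (fun i hi => ?_)
      have hi' := (PySem.List.mem_pyRange_one).1 hi
      rw [hr, hmod,
          show n % m = (((n % m).toNat : Nat) : Int) by omega,
          pv_rowA_eq m (PySem.Int.floordiv n m) i hmp hi'.1 hi'.2 (n % m).toNat (by omega),
          Int.toNat_of_nonneg hr0,
          pv_rot m (PySem.Int.floordiv n m) i (n % m) hmp hi'.1 hi'.2 hr0 hrm]
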